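-- pv_equiv track=rewrite | github.com/RajashreeDahal4/Algorithms | Zhang_questions/Divide_and_conquer/max_min_array.py | max_min_array
-- ===== SOURCE A (Python) =====
-- def max_min_array(array,start,end):
--     if start==end:
--         return array[start],array[start]
--     else:
--         mid=(start+end)//2
--         left_max,left_min=max_min_array(array,start,mid)
--         right_max,right_min=max_min_array(array,mid+1,end)
--         if left_max>right_max:
--             maximum=left_max
--         else:
--             maximum=right_max
--         if left_min<right_min:
--             minimum=left_min
--         else:
--             minimum=right_min
--     return maximum,minimum
-- ===== SOURCE B (Python) =====
-- def max_min_array(array, start, end):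
--     segment = [array[i] for i in range(start, end + 1)]
--     return max(segment), min(segment)
-- ===== Notes on version B (the rewrite author's own statement) =====
-- stated objective: simpler
-- what changed: Replaced the recursive divide-and-conquer (split at the midpoint, recurse on both halves, merge) by materialising the segment with one flat comprehension and taking builtin max and min of it.
import Mathlib
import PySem

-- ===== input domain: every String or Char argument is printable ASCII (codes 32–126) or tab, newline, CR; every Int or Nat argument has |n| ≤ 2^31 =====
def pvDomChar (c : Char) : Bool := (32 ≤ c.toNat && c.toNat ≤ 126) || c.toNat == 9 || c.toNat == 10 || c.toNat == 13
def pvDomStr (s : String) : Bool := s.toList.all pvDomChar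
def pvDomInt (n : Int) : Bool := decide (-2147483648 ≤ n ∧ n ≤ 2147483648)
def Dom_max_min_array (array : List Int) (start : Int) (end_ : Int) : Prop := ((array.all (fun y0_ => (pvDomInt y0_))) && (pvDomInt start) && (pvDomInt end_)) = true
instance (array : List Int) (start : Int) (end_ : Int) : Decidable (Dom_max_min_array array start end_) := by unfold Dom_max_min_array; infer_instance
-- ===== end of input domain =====

-- B replaces A's midpoint divide-and-conquer recursion by one flat comprehension
-- over the segment followed by builtin max and min (simpler: no recursion).

-- ===== PORT A =====
-- Literal port of A's divide-and-conquer. Where Python would raise IndexError the port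
-- reads the default 0 (excluded by Pre_); when start > end_ Python recurses forever
-- (RecursionError), so the port returns (0, 0) there purely as a totality guard
-- (also outside Pre_).
def max_min_array (array : List Int) (start : Int) (end_ : Int) : Int × Int :=
  if start = end_ then
    ((PySem.List.pyGet? array start).getD 0, (PySem.List.pyGet? array start).getD 0)
  else if _h : start < end_ then
    let mid := PySem.Int.floordiv (start + end_) 2
    let lm := max_min_array array start mid
    let rm := max_min_array array (mid + 1) end_
    let maximum := if lm.1 > rm.1 then lm.1 else rm.1
    let minimum := if lm.2 < rm.2 then lm.2 else rm.2
    (maximum, minimum)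
  else (0, 0)
termination_by (end_ - start).toNat
decreasing_by
  · have h1 := (PySem.Int.floordiv_lt_iff_lt_mul (a := start + end_) (b := 2) (q := end_) (by omega)).2 (by omega)
    omega
  · have h2 := (PySem.Int.le_floordiv_iff_mul_le (a := start + end_) (b := 2) (q := start) (by omega)).2 (by omega)
    omega

-- ===== PORT B =====
-- Literal port of B: the comprehension [array[i] for i in range(start, end+1)],
-- then builtin max and min of it. Python's max/min raise ValueError on an empty
-- segment; the port reads the default 0 there (outside Pre_).
def max_min_array_alt (array : List Int) (start : Int) (end_ : Int) : Int × Int :=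
  let segment := (PySem.List.pyRange start (end_ + 1) 1).map
    (fun i => (PySem.List.pyGet? array i).getD 0)
  ((PySem.List.max? segment (fun y => y)).getD 0,
   (PySem.List.min? segment (fun y => y)).getD 0)

-- ===== PRECONDITION & SPEC =====
-- Pre_: exactly where Python A returns — start ≤ end (otherwise the recursion never
-- terminates: RecursionError; B raises ValueError there too) and every visited index
-- start..end_ is a valid Python index (otherwise IndexError in both).
def Pre_max_min_array (array : List Int) (start : Int) (end_ : Int) : Prop :=
  start ≤ end_ ∧ -(array.length : Int) ≤ start ∧ end_ < (array.length : Int)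
instance (array : List Int) (start : Int) (end_ : Int) : Decidable (Pre_max_min_array array start end_) := by unfold Pre_max_min_array; infer_instance
def pvWitness_max_min_array : List Int × Int × Int := ([3, -1, 4, 1, 5], 1, 4)

def Spec_max_min_array (array : List Int) (start : Int) (end_ : Int) (out : Int × Int) : Prop := out = max_min_array_alt array start end_
instance (array : List Int) (start : Int) (end_ : Int) (out : Int × Int) : Decidable (Spec_max_min_array array start end_ out) := by unfold Spec_max_min_array; infer_instance

-- ===== CLAIM (what is proved, stated in full; the proofs are below) =====
def Claim_equal_max_min_array : Prop := ∀ (array : List Int) (start : Int) (end_ : Int), Dom_max_min_array array start end_ → Pre_max_min_array array start end_ → Spec_max_min_array array start end_ (max_min_array array start end_)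

-- ===== LEMMAS AND PROOFS =====

-- the mapped segment, as the proofs speak about it
def pvSeg (array : List Int) (s e : Int) : List Int :=
  (PySem.List.pyRange s (e + 1) 1).map (fun i => (PySem.List.pyGet? array i).getD 0)

theorem alt_eq_seg (array : List Int) (s e : Int) :
    max_min_array_alt array s e
      = ((PySem.List.max? (pvSeg array s e) (fun y => y)).getD 0,
         (PySem.List.min? (pvSeg array s e) (fun y => y)).getD 0) := rfl

-- pull the seed out of a running max/min fold
theorem foldl_max_out (t : List Int) : ∀ (a b : Int),
    t.foldl max (max a b) = max a (t.foldl max b) := by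
  induction t with
  | nil => intro a b; rfl
  | cons x xs ih =>
    intro a b
    simp only [List.foldl_cons, max_assoc]
    exact ih a (max b x)

theorem foldl_min_out (t : List Int) : ∀ (a b : Int),
    t.foldl min (min a b) = min a (t.foldl min b) := by
  induction t with
  | nil => intro a b; rfl
  | cons x xs ih =>
    intro a b
    simp only [List.foldl_cons, min_assoc]
    exact ih a (min b x)

-- builtin max/min over two concatenated nonempty lists = binary merge of the two
theorem max?_append (a b : Int) (t1 t2 : List Int) :
    (PySem.List.max? ((a :: t1) ++ (b :: t2)) (fun y => y)).getD 0
      = max ((PySem.List.max? (a :: t1) (fun y => y)).getD 0)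
            ((PySem.List.max? (b :: t2) (fun y => y)).getD 0) := by
  simp only [List.cons_append, PySem.List.max?_id_cons, Option.getD_some]
  rw [List.foldl_append, List.foldl_cons]
  have := foldl_max_out t2 (t1.foldl max a) b
  rw [← this]

theorem min?_append (a b : Int) (t1 t2 : List Int) :
    (PySem.List.min? ((a :: t1) ++ (b :: t2)) (fun y => y)).getD 0
      = min ((PySem.List.min? (a :: t1) (fun y => y)).getD 0)
            ((PySem.List.min? (b :: t2) (fun y => y)).getD 0) := by
  simp only [List.cons_append, PySem.List.min?_id_cons, Option.getD_some]
  rw [List.foldl_append, List.foldl_cons]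
  have := foldl_min_out t2 (t1.foldl min a) b
  rw [← this]

-- the segment is nonempty and splits at any interior point
theorem seg_cons (array : List Int) (s e : Int) (h : s ≤ e) :
    pvSeg array s e
      = ((PySem.List.pyGet? array s).getD 0) :: (PySem.List.pyRange (s + 1) (e + 1) 1).map
          (fun i => (PySem.List.pyGet? array i).getD 0) := by
  unfold pvSeg
  rw [PySem.List.pyRange_one_cons (by omega), List.map_cons]

theorem seg_split (array : List Int) (s m e : Int) (h1 : s ≤ m) (h2 : m ≤ e) :
    pvSeg array s e = pvSeg array s m ++ pvSeg array (m + 1) e := by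
  unfold pvSeg
  rw [PySem.List.pyRange_one_append s (m + 1) (e + 1) (by omega) (by omega), List.map_append]

-- A's binary merge of two adjacent segments = B on the whole segment
theorem alt_split (array : List Int) (s m e : Int) (hsm : s ≤ m) (hme : m < e) :
    max_min_array_alt array s e =
      (max (max_min_array_alt array s m).1 (max_min_array_alt array (m + 1) e).1,
       min (max_min_array_alt array s m).2 (max_min_array_alt array (m + 1) e).2) := by
  rw [alt_eq_seg, alt_eq_seg, alt_eq_seg]
  rw [seg_split array s m e hsm (by omega)]
  rw [seg_cons array s m hsm, seg_cons array (m + 1) e (by omega)]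
  rw [max?_append, min?_append]

-- Main induction: A = B whenever start ≤ end_.
theorem eq_of_le (array : List Int) : ∀ (start end_ : Int), start ≤ end_ →
    max_min_array array start end_ = max_min_array_alt array start end_ := by
  intro s e h
  by_cases hse : s = e
  · subst hse
    rw [max_min_array, if_pos rfl]
    rw [alt_eq_seg, seg_cons array s s (le_refl s),
        PySem.List.pyRange_one_eq_nil (by omega)]
    rfl
  · have hlt : s < e := lt_of_le_of_ne h hse
    rw [max_min_array, if_neg hse, dif_pos hlt]
    have hmid1 := (PySem.Int.le_floordiv_iff_mul_le (a := s + e) (b := 2) (q := s) (by omega)).2 (by omega)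
    have hmid2 := (PySem.Int.floordiv_lt_iff_lt_mul (a := s + e) (b := 2) (q := e) (by omega)).2 (by omega)
    set mid := PySem.Int.floordiv (s + e) 2 with hm
    have ihl := eq_of_le array s mid hmid1
    have ihr := eq_of_le array (mid + 1) e (by omega)
    simp only []
    rw [ihl, ihr, alt_split array s mid e hmid1 hmid2]
    simp only [Prod.mk.injEq]
    constructor <;> split <;> omega
termination_by s e _ => (e - s).toNat
decreasing_by
  all_goals omega

-- ===== VERDICT (by name: the statement is the Claim_ definition above) =====
theorem max_min_array_spec : Claim_equal_max_min_array := by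
  intro array start end_ _hd hpre
  exact eq_of_le array start end_ hpre.1
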